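-- pv_equiv track=rewrite | github.com/bishalroy20/Python | Module 3/C_Good_Sequence.py | good_sequence
-- ===== SOURCE A (Python) =====
-- from collections import Counter
--
-- def good_sequence(t, a):
--     count = Counter(a)
--     removals = 0
--
--     for num, freq in count.items():
--         if freq > num:
--             removals += freq - num
--         elif freq < num:
--             removals += freq
--
--     return removals
-- ===== SOURCE B (Python) =====
-- def good_sequence(t, a):
--     b = sorted(a)
--     n = len(b)
--     removals = 0
--     i = 0
--     while i < n:
--         v = b[i]
--         j = i + 1
--         while j < n and b[j] == v:
--             j += 1
--         f = j - i
--         if f > v: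
--             removals += f - v
--         elif f < v:
--             removals += f
--         i = j
--     return removals
-- ===== Notes on version B (the rewrite author's own statement) =====
-- stated objective: alternative
-- what changed: Drops the Counter hash map entirely: B sorts the list and scans adjacent equal-value runs with two indices, accumulating the same per-value removal contribution from each run length.
import Mathlib
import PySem

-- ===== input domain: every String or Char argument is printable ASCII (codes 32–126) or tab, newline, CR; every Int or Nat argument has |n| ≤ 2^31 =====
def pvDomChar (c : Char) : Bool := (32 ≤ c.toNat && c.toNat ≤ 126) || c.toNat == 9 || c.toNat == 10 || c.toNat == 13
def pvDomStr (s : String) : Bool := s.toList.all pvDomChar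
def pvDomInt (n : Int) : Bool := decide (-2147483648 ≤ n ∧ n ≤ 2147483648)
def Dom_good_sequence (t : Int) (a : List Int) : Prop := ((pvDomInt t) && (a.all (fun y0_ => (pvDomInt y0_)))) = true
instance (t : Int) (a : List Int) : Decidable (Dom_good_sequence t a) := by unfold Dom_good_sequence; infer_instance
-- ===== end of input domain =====

-- B drops the Counter hash map: it sorts the list and scans adjacent equal-value runs
-- (two-index run scan), accumulating the same per-value removal contribution; same values, different algorithm.


-- ===== PORT A =====
def good_sequence (t : Int) (a : List Int) : Int :=
  let count := PySem.Dict.counter a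
  count.items.foldl
    (fun removals p =>
      let num := p.1
      let freq := p.2
      if freq > num then removals + (freq - num)
      else if freq < num then removals + freq
      else removals) 0

-- ===== PORT B =====
-- the outer while loop of Source B, as structural recursion on the remaining suffix of the
-- sorted list; the inner while loop advancing j is the takeWhile/dropWhile split of the run
def gsRunScan : List Int → Int
  | [] => 0
  | v :: rest =>
    let f : Int := 1 + ((rest.takeWhile (fun x => x == v)).length : Int)
    let c := if f > v then f - v else if f < v then f else 0
    c + gsRunScan (rest.dropWhile (fun x => x == v))
termination_by l => l.length
decreasing_by
  exact Nat.lt_succ_of_le (List.Sublist.length_le (List.dropWhile_sublist _))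

def good_sequence_alt (t : Int) (a : List Int) : Int :=
  gsRunScan (PySem.List.sorted a (fun x => x) false)

-- ===== PRECONDITION & SPEC =====
def Spec_good_sequence (t : Int) (a : List Int) (out : Int) : Prop := out = good_sequence_alt t a
instance (t : Int) (a : List Int) (out : Int) : Decidable (Spec_good_sequence t a out) := by unfold Spec_good_sequence; infer_instance

-- ===== CLAIM (what is proved, stated in full; the proofs are below) =====
def Claim_equal_good_sequence : Prop := ∀ (t : Int) (a : List Int), Dom_good_sequence t a → Spec_good_sequence t a (good_sequence t a)

-- ===== LEMMAS AND PROOFS =====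

-- the per-value removal contribution both programs accumulate
def gsG (l : List Int) (k : Int) : Int :=
  if (l.count k : Int) > k then (l.count k : Int) - k
  else if (l.count k : Int) < k then (l.count k : Int) else 0

-- A's branchy foldl is init plus the sum of per-item contributions
theorem gs_foldl_eq_sum (l : List (Int × Int)) (init : Int) :
    l.foldl
      (fun removals p =>
        let num := p.1
        let freq := p.2
        if freq > num then removals + (freq - num)
        else if freq < num then removals + freq
        else removals) init
    = init + (l.map (fun p =>
        if p.2 > p.1 then p.2 - p.1 else if p.2 < p.1 then p.2 else 0)).sum := by
  induction l generalizing init with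
  | nil => simp
  | cons p rest ih =>
    simp only [List.foldl_cons, List.map_cons, List.sum_cons, ih]
    split_ifs <;> omega

-- A computes the sum of gsG over the distinct values of a
theorem gs_A_eq (t : Int) (a : List Int) :
    good_sequence t a = ((PySem.Set.ofList a).map (gsG a)).sum := by
  unfold good_sequence
  simp only [PySem.Dict.items_counter, gs_foldl_eq_sum, List.map_map, Function.comp_def, zero_add]
  rfl

-- the run scan over a sorted list is the sum of gsG over its distinct values
theorem gs_scan_eq_sum (s : List Int) :
    s.Pairwise (· ≤ ·) → gsRunScan s = ((PySem.Set.ofList s).map (gsG s)).sum := by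
  induction s using gsRunScan.induct with
  | case1 => intro _; simp [gsRunScan]
  | case2 v rest ih =>
    intro h
    have hv : ∀ x ∈ rest, v ≤ x := (List.pairwise_cons.mp h).1
    have hrest : rest.Pairwise (· ≤ ·) := (List.pairwise_cons.mp h).2
    set tw := rest.takeWhile (fun x => x == v) with htw
    set d := rest.dropWhile (fun x => x == v) with hd
    have hsplit : tw ++ d = rest := List.takeWhile_append_dropWhile
    have htwv : ∀ x ∈ tw, x = v := by
      intro x hx
      simpa using List.mem_takeWhile_imp hx
    have hdpair : d.Pairwise (· ≤ ·) := hrest.sublist (List.dropWhile_sublist _)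
    have hdgt : ∀ x ∈ d, v < x := by
      cases hdc : d with
      | nil => intro x hx; cases hx
      | cons h0 dt =>
        have w : rest.dropWhile (fun x => x == v) ≠ [] := by rw [← hd, hdc]; simp
        have h2 := List.head_dropWhile_not (p := fun x => x == v) (l := rest) w
        have hhead : (rest.dropWhile (fun x => x == v)).head w = h0 := by
          simp only [← hd, hdc, List.head_cons]
        rw [hhead] at h2
        have hh0rest : h0 ∈ rest := (List.dropWhile_sublist _).mem (by rw [← hd, hdc]; simp)
        have hvh0 : v < h0 := lt_of_le_of_ne (hv h0 hh0rest) (by simpa using (Ne.symm (by simpa using h2)))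
        have hpair' : (h0 :: dt).Pairwise (· ≤ ·) := hdc ▸ hdpair
        intro x hx
        rcases List.mem_cons.mp hx with rfl | hx
        · exact hvh0
        · exact lt_of_lt_of_le hvh0 ((List.pairwise_cons.mp hpair').1 x hx)
    have hvnd : v ∉ d := fun hx => lt_irrefl v (hdgt v hx)
    have hcountv : (v :: rest).count v = 1 + tw.length := by
      have h1 : tw.count v = tw.length := List.count_eq_length.mpr (fun b hb => (htwv b hb).symm)
      have h2 : d.count v = 0 := List.count_eq_zero.mpr hvnd
      rw [List.count_cons_self, ← hsplit, List.count_append, h1, h2]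
      omega
    have hcountk : ∀ k, k ≠ v → (v :: rest).count k = d.count k := by
      intro k hk
      have h1 : tw.count k = 0 := List.count_eq_zero.mpr (fun hx => hk (htwv k hx))
      rw [List.count_cons_of_ne hk.symm, ← hsplit, List.count_append, h1]
      omega
    have hperm : (PySem.Set.ofList (v :: rest)).Perm (v :: PySem.Set.ofList d) := by
      apply (List.perm_ext_iff_of_nodup (PySem.Set.nodup_ofList _) ?_).mpr
      · intro x
        simp only [PySem.Set.mem_ofList, List.mem_cons]
        constructor
        · rintro (rfl | hx)
          · exact Or.inl rfl
          · rw [← hsplit] at hx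
            rcases List.mem_append.mp hx with hx | hx
            · exact Or.inl (htwv x hx)
            · exact Or.inr hx
        · rintro (rfl | hx)
          · exact Or.inl rfl
          · exact Or.inr (by rw [← hsplit]; exact List.mem_append_right _ hx)
      · exact List.nodup_cons.mpr ⟨by simpa [PySem.Set.mem_ofList] using hvnd, PySem.Set.nodup_ofList _⟩
    have hL : gsRunScan (v :: rest)
        = (if (1 + (tw.length : Int)) > v then (1 + (tw.length : Int)) - v
           else if (1 + (tw.length : Int)) < v then (1 + (tw.length : Int)) else 0)
          + gsRunScan d := by
      rw [gsRunScan]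
    rw [hL, ih hdpair, (hperm.map (gsG (v :: rest))).sum_eq]
    simp only [List.map_cons, List.sum_cons]
    have hGv : gsG (v :: rest) v
        = (if (1 + (tw.length : Int)) > v then (1 + (tw.length : Int)) - v
           else if (1 + (tw.length : Int)) < v then (1 + (tw.length : Int)) else 0) := by
      unfold gsG
      rw [hcountv]
      push_cast
      rfl
    have hmap : (PySem.Set.ofList d).map (gsG (v :: rest)) = (PySem.Set.ofList d).map (gsG d) := by
      apply List.map_congr_left
      intro k hk
      have hkd : k ∈ d := by simpa [PySem.Set.mem_ofList] using hk
      have hkv : k ≠ v := fun e => hvnd (e ▸ hkd)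
      unfold gsG
      rw [hcountk k hkv]
    rw [hGv, hmap]

-- ===== VERDICT (by name: the statement is the Claim_ definition above) =====
theorem good_sequence_spec : Claim_equal_good_sequence := by
  intro t a _
  show good_sequence t a = good_sequence_alt t a
  have hperm : (PySem.List.sorted a (fun x => x) false).Perm a := PySem.List.sorted_perm ..
  have hpair : (PySem.List.sorted a (fun x => x) false).Pairwise (· ≤ ·) := by
    have := PySem.List.sorted_pairwise a (fun x => x)
    simpa using this
  rw [gs_A_eq, good_sequence_alt, gs_scan_eq_sum _ hpair]
  have hG : gsG (PySem.List.sorted a (fun x => x) false) = gsG a := by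
    funext k; unfold gsG; rw [hperm.count_eq]
  rw [hG]
  have hdperm : (PySem.Set.ofList (PySem.List.sorted a (fun x => x) false)).Perm (PySem.Set.ofList a) := by
    apply (List.perm_ext_iff_of_nodup (PySem.Set.nodup_ofList _) (PySem.Set.nodup_ofList _)).mpr
    intro x
    rw [PySem.Set.mem_ofList, PySem.Set.mem_ofList, hperm.mem_iff]
  exact ((hdperm.map (gsG a)).sum_eq).symm
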